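-- pv_equiv track=rewrite | github.com/TepidJesus/CloudCrack | main.py | valid_mask
-- ===== SOURCE A (Python) =====
-- def valid_mask(mask):
--     if mask == None:
--         return False
--
--     if "?" not in mask:
--         return False
--
--     if len(mask) <= 1:
--         return False
--
--     for i in range(len(mask)):
--         char = mask[i]
--         if char != "?" and char != "d" and char != "l" and char != "u" and char != "s" and char != "a" and char != "h" and char != "H" and char != "b":
--             return False
--         if char == "?" and i % 2 != 0:
--             return False
--         if char != "?" and i % 2 == 0:
--             return False
--     return True
-- ===== SOURCE B (Python) =====
-- def valid_mask(mask):
--     if mask is None or "?" not in mask or len(mask) <= 1: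
--         return False
--     return all(c == "?" for c in mask[0::2]) and all(c in "dlusahHb" for c in mask[1::2])
-- ===== Notes on version B (the rewrite author's own statement) =====
-- stated objective: simpler
-- what changed: Replaced the indexed loop with per-index parity checks and early returns by two strided slices: every char at an even index must be the placeholder marker and every char at an odd index must be a charset token.
import Mathlib
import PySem

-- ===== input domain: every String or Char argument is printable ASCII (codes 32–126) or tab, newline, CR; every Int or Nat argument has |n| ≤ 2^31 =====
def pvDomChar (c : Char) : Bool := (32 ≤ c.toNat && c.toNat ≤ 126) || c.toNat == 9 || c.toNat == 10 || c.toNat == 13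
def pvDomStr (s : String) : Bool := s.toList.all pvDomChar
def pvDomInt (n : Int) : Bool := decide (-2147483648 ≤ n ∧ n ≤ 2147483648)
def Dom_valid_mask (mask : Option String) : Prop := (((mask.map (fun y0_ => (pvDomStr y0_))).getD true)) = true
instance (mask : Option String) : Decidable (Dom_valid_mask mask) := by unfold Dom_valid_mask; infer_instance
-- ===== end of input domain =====

-- B validates the mask with two strided slices (even chars all '?', odd chars all tokens) instead of A's indexed loop with parity tests; objective: simpler.


-- ===== PORT A =====
-- the indexed for-loop of A, state = remaining chars + current index i
def validMaskLoopA : List Char → Nat → Bool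
  | [], _ => true
  | c :: rest, i =>
    if (c != '?' && c != 'd' && c != 'l' && c != 'u' && c != 's' && c != 'a' && c != 'h' && c != 'H' && c != 'b') then false
    else if (c == '?' && i % 2 != 0) then false
    else if (c != '?' && i % 2 == 0) then false
    else validMaskLoopA rest (i + 1)

def valid_mask (mask : Option String) : Bool :=
  match mask with
  | none => false                                   -- mask == None
  | some s =>
    let cs := s.toList
    if ¬ cs.contains '?' then false                 -- "?" not in mask (single-char needle: list membership is exact)
    else if cs.length ≤ 1 then false                -- len(mask) <= 1
    else validMaskLoopA cs 0

-- ===== PORT B =====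
-- mask[0::2]: every other char starting at index 0
def stride2 : List Char → List Char
  | [] => []
  | [c] => [c]
  | c :: _ :: rest => c :: stride2 rest

def tokenB (c : Char) : Bool := ['d', 'l', 'u', 's', 'a', 'h', 'H', 'b'].contains c   -- c in "dlusahHb"

def valid_mask_alt (mask : Option String) : Bool :=
  match mask with
  | none => false
  | some s =>
    let cs := s.toList
    if ¬ cs.contains '?' ∨ cs.length ≤ 1 then false
    else (stride2 cs).all (fun c => c == '?') && (stride2 (cs.drop 1)).all tokenB

-- ===== PRECONDITION & SPEC =====
def Spec_valid_mask (mask : Option String) (out : Bool) : Prop := out = valid_mask_alt mask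
instance (mask : Option String) (out : Bool) : Decidable (Spec_valid_mask mask out) := by unfold Spec_valid_mask; infer_instance

-- ===== CLAIM (what is proved, stated in full; the proofs are below) =====
def Claim_equal_valid_mask : Prop := ∀ (mask : Option String), Dom_valid_mask mask → Spec_valid_mask mask (valid_mask mask)

-- ===== LEMMAS AND PROOFS =====

lemma stride2_cons (c : Char) (rest : List Char) :
    stride2 (c :: rest) = c :: stride2 (rest.drop 1) := by
  cases rest <;> simp [stride2]

lemma tokenB_eq (c : Char) :
    tokenB c = (c == 'd' || c == 'l' || c == 'u' || c == 's' || c == 'a' || c == 'h' || c == 'H' || c == 'b') := by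
  simp only [tokenB, List.contains_cons, List.contains_nil, Bool.or_false, Bool.or_assoc]

lemma loopA_step (c : Char) (rest : List Char) (j : Nat) :
    validMaskLoopA (c :: rest) j =
      ((if j % 2 = 0 then c == '?' else tokenB c) && validMaskLoopA rest (j + 1)) := by
  have hcond : (c != '?' && c != 'd' && c != 'l' && c != 'u' && c != 's' && c != 'a' && c != 'h' && c != 'H' && c != 'b')
      = !((c == '?') || tokenB c) := by
    simp [tokenB_eq, Bool.and_assoc, bne, Bool.not_or, Bool.or_assoc]
  by_cases hc : c = '?'
  · subst hc
    have ht : tokenB '?' = false := by decide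
    by_cases hj : j % 2 = 0 <;> simp [validMaskLoopA, ht, hj]
  · have hc' : (c == '?') = false := by simp [hc]
    by_cases ht : tokenB c
    · by_cases hj : j % 2 = 0 <;> simp [validMaskLoopA, hcond, hc', hc, ht, hj]
    · have ht' : tokenB c = false := by simpa using ht
      by_cases hj : j % 2 = 0 <;> simp [validMaskLoopA, hcond, hc', ht', hj]

lemma loopA_eq (cs : List Char) (i : Nat) :
    validMaskLoopA cs i =
      if i % 2 = 0
      then ((stride2 cs).all (fun c => c == '?') && (stride2 (cs.drop 1)).all tokenB)
      else ((stride2 cs).all tokenB && (stride2 (cs.drop 1)).all (fun c => c == '?')) := by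
  induction cs generalizing i with
  | nil => simp [validMaskLoopA, stride2]
  | cons c rest ih =>
    rw [loopA_step, ih (i + 1), stride2_cons]
    by_cases hi : i % 2 = 0
    · have hi1 : ¬ (i + 1) % 2 = 0 := by omega
      simp [hi, hi1, Bool.and_comm, Bool.and_left_comm]
    · have hi1 : (i + 1) % 2 = 0 := by omega
      simp [hi, hi1, Bool.and_assoc, Bool.and_comm]

-- ===== VERDICT (by name: the statement is the Claim_ definition above) =====
theorem valid_mask_spec : Claim_equal_valid_mask := by
  intro mask _
  unfold Spec_valid_mask valid_mask valid_mask_alt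
  cases mask with
  | none => rfl
  | some s =>
    by_cases h1 : '?' ∈ s.toList
    · by_cases h2 : s.length ≤ 1
      · simp [h1, h2]
      · simp [h1, h2, loopA_eq, List.drop_one]
    · simp [h1]
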